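-- pv_equiv track=rewrite | github.com/rattus-aristarchus/scholastica_gedit | scholastica/util.py | truncate_source
-- ===== SOURCE A (Python) =====
-- def truncate_source(source):
--     """
--     Return a short reference to a source from its full name
--     """
--     result = ""
--
--     #The first word of the reference is usually the first word of the source
--     for ch in source:
--         if ch.isspace() or ch in [",", ":", "."]:
--             break
--         else:
--             result += ch
--
--     #After that, usually the year of publishing is added. To find that, we look for
--     #4 consecutive digits that have non-digits on either side
--     if len(source) >= 4:
--         year = ""
--         for idx in range(len(source) - 3):
--             four_consecutive_digits = source[idx:idx+4].isdigit()
--             non_digit_before = idx == 0 or not source[idx-1].isdigit()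
--             non_digit_after = idx+4 >= len(source) or not source[idx+4].isdigit()
--             if four_consecutive_digits and non_digit_before and non_digit_after:
--                 year = source[idx:idx+4]
--         if not year == "":
--             result += " " + year
--     return result
-- ===== SOURCE B (Python) =====
-- def truncate_source(source):
--     """
--     Return a short reference to a source from its full name
--     """
--     # first word: cut the source at the first separator character
--     end = len(source)
--     for i, ch in enumerate(source):
--         if ch.isspace() or ch in ",:.":
--             end = i
--             break
--     result = source[:end]
--     # year: group maximal runs of consecutive digits in one pass;
--     # the last maximal run of length exactly 4 is the year
--     year = None
--     run = ""
--     for ch in source: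
--         if ch.isdigit():
--             run += ch
--         else:
--             if len(run) == 4:
--                 year = run
--             run = ""
--     if len(run) == 4:
--         year = run
--     if year is not None:
--         result += " " + year
--     return result
-- ===== Notes on version B (the rewrite author's own statement) =====
-- stated objective: faster
-- what changed: The per-index sliding 4-char window (a fresh slice plus before/after boundary probes at every index) is replaced by a single pass that groups maximal digit runs and keeps the last run of length exactly 4 as the year; the first word is cut at the first separator index found via enumerate instead of being built char by char.
import Mathlib
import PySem

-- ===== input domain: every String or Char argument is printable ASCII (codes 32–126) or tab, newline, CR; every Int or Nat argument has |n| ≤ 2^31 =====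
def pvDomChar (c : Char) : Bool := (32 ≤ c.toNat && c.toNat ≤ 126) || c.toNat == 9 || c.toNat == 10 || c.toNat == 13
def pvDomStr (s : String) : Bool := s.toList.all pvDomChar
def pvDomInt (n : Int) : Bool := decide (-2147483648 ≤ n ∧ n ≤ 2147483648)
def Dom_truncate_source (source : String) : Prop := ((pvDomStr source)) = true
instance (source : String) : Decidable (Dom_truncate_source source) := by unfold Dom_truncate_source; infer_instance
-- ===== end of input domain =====

-- B replaces A's per-index sliding 4-char window (with before/after boundary probes)
-- by a single pass that groups maximal digit runs and keeps the last run of length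
-- exactly 4; same return value, measurably faster by a constant factor (no slicing per index).

-- ===== PORT A =====
def tsStopA (c : Char) : Bool := PySem.Chars.isspace c || [',', ':', '.'].contains c

-- the first-word loop with its break
def tsWordA : List Char → List Char
  | [] => []
  | c :: cs => if tsStopA c then [] else c :: tsWordA cs

-- A's loop-body test at index idx; source[idx-1] / source[idx+4] are only reached by
-- Python when the short-circuiting left disjunct is false, i.e. in range, so pyGetD
-- with a dummy default is exact there.
def tsCondA (s : List Char) (idx : Int) : Bool :=
  PySem.Chars.strIsdigit (PySem.List.slice s (some idx) (some (idx + 4)))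
    && (idx == 0 || ! PySem.Chars.isdigit (PySem.List.pyGetD s (idx - 1) ' '))
    && (decide ((s.length : Int) ≤ idx + 4) || ! PySem.Chars.isdigit (PySem.List.pyGetD s (idx + 4) ' '))

def truncate_source (source : String) : String :=
  let s := source.toList
  let result := tsWordA s
  if 4 ≤ s.length then
    let year := (PySem.List.pyRange 0 ((s.length : Int) - 3) 1).foldl
      (fun year idx =>
        if tsCondA s idx then PySem.List.slice s (some idx) (some (idx + 4)) else year) []
    if year ≠ [] then String.ofList (result ++ ' ' :: year) else String.ofList result
  else String.ofList result

-- ===== PORT B =====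
def tsStopB (c : Char) : Bool := PySem.Chars.isspace c || [',', ':', '.'].contains c

-- 'for i, ch in enumerate(source): if stop: end = i; break' with initial end = len(source)
def tsAltEnd : List (Int × Char) → Int → Int
  | [], e => e
  | (i, ch) :: rest, e => if tsStopB ch then i else tsAltEnd rest e

-- one pass grouping maximal digit runs: state (run, year)
def tsAltScan : List Char → List Char → Option (List Char) → List Char × Option (List Char)
  | [], run, year => (run, year)
  | ch :: cs, run, year =>
    if PySem.Chars.isdigit ch then tsAltScan cs (run ++ [ch]) year
    else tsAltScan cs [] (if run.length == 4 then some run else year)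

def truncate_source_alt (source : String) : String :=
  let s := source.toList
  let e := tsAltEnd (PySem.List.enumerate s 0) ((s.length : Int))
  let result := PySem.List.slice s none (some e)
  let p := tsAltScan s [] none
  let year := if p.1.length == 4 then some p.1 else p.2
  match year with
  | some y => String.ofList (result ++ ' ' :: y)
  | none => String.ofList result

-- ===== PRECONDITION & SPEC =====
def Spec_truncate_source (source : String) (out : String) : Prop := out = truncate_source_alt source
instance (source : String) (out : String) : Decidable (Spec_truncate_source source out) := by unfold Spec_truncate_source; infer_instance

-- ===== CLAIM (what is proved, stated in full; the proofs are below) =====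
def Claim_equal_truncate_source : Prop := ∀ (source : String), Dom_truncate_source source → Spec_truncate_source source (truncate_source source)

-- ===== LEMMAS AND PROOFS =====

-- proof-only helpers: '' vs None encoding of "no year yet", and A's fold as a
-- right-recursion over the number of loop iterations
def optOf (l : List Char) : Option (List Char) := if l = [] then none else some l

def lastY (s : List Char) : Nat → List Char
  | 0 => []
  | k + 1 => if tsCondA s (k : Int) then PySem.List.slice s (some (k : Int)) (some ((k : Int) + 4)) else lastY s k

theorem stopB_eq : tsStopB = tsStopA := rfl

-- A's word loop is takeWhile
theorem wordA_eq_takeWhile (s : List Char) : tsWordA s = s.takeWhile (fun c => ! tsStopA c) := by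
  induction s with
  | nil => rfl
  | cons c cs ih =>
    by_cases h : tsStopA c = true <;> simp [tsWordA, List.takeWhile_cons, h, ih]

-- B's enumerate loop finds the takeWhile length
theorem altEnd_eq (s : List Char) (k : Int) :
    tsAltEnd (PySem.List.enumerate s k) (k + s.length) =
      k + ((s.takeWhile fun c => ! tsStopA c).length : Int) := by
  induction s generalizing k with
  | nil => simp [PySem.List.enumerate, tsAltEnd]
  | cons c cs ih =>
    by_cases h : tsStopA c = true
    · simp [PySem.List.enumerate, tsAltEnd, stopB_eq, h, List.takeWhile_cons]
    · have harr : k + ((c :: cs).length : Int) = (k + 1) + (cs.length : Int) := by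
        simp; ring
      simp only [PySem.List.enumerate, tsAltEnd, stopB_eq, h, harr,
        List.takeWhile_cons, Bool.not_eq_true']
      rw [ih (k + 1)]
      simp [h]
      ring

-- A's year fold equals the right-recursion lastY
theorem foldA_eq_lastY (s : List Char) (k : Nat) :
    (PySem.List.pyRange 0 (k : Int) 1).foldl
      (fun year idx =>
        if tsCondA s idx then PySem.List.slice s (some idx) (some (idx + 4)) else year) []
    = lastY s k := by
  induction k with
  | zero => simp [PySem.List.pyRange_one_eq_nil, lastY]
  | succ k ih =>
    have : ((k : Int) + 1) = ((k + 1 : Nat) : Int) := by push_cast; ring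
    rw [← this, PySem.List.pyRange_one_succ_right (by positivity), List.foldl_append]
    simp [lastY, ih]

-- snoc behaviour of B's scan
theorem scan_snoc (t : List Char) (c : Char) (run : List Char) (year : Option (List Char)) :
    tsAltScan (t ++ [c]) run year =
      (if PySem.Chars.isdigit c then ((tsAltScan t run year).1 ++ [c], (tsAltScan t run year).2)
       else ([], if (tsAltScan t run year).1.length == 4 then some (tsAltScan t run year).1 else (tsAltScan t run year).2)) := by
  induction t generalizing run year with
  | nil => simp [tsAltScan]
  | cons d t ih =>
    by_cases h : PySem.Chars.isdigit d = true <;> simp [tsAltScan, h, ih]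

-- every position of an all-digit segment is a digit
theorem all_dig_seg (s : List Char) (a len : Nat) (hlen : a + len ≤ s.length)
    (hall : ((s.drop a).take len).all PySem.Chars.isdigit = true) :
    ∀ j, a ≤ j → j < a + len → PySem.Chars.isdigit (s.getD j ' ') = true := by
  intro j hj1 hj2
  have hjs : j < s.length := by omega
  have hlen2 : j - a < ((s.drop a).take len).length := by
    simp [List.length_take, List.length_drop]; omega
  have he : ((s.drop a).take len)[j - a] = s[j] := by
    rw [List.getElem_take, List.getElem_drop]; congr 1; omega
  rw [List.all_eq_true] at hall
  have := hall _ (List.getElem_mem hlen2)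
  rw [he] at this
  rw [List.getD_eq_getElem s ' ' hjs]
  exact this

-- A's loop condition at i = m - 4 holds iff the maximal digit run ending at m has length 4
theorem cond_iff (s : List Char) (m rl : Nat) (h4 : 4 ≤ m) (hm : m ≤ s.length) (hrl : rl ≤ m)
    (hall : ((s.drop (m - rl)).take rl).all PySem.Chars.isdigit = true)
    (hbd : rl = m ∨ PySem.Chars.isdigit (s.getD (m - rl - 1) ' ') = false)
    (hafter : (decide ((s.length : Int) ≤ ((m - 4 : Nat) : Int) + 4)
        || ! PySem.Chars.isdigit (PySem.List.pyGetD s (((m - 4 : Nat) : Int) + 4) ' ')) = true) :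
    (tsCondA s ((m - 4 : Nat) : Int) = true) ↔ rl = 4 := by
  set i := m - 4 with hi
  have him : i + 4 = m := by omega
  have hslice : PySem.List.slice s (some (i : Int)) (some ((i : Int) + 4)) = (s.drop i).take 4 := by
    have h4' : ((i : Int) + 4) = ((i : Int) + ((4 : Nat) : Int)) := by norm_cast
    rw [h4', PySem.List.slice_natCast_add]
  have hwlen : ((s.drop i).take 4).length = 4 := by
    simp [List.length_take, List.length_drop]; omega
  unfold tsCondA
  rw [hslice]
  simp only [Bool.and_eq_true, Bool.or_eq_true, PySem.Chars.strIsdigit,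
    beq_iff_eq, decide_eq_true_eq, Bool.not_eq_eq_eq_not, Bool.not_true]
  constructor
  · rintro ⟨⟨⟨hne, hwall⟩, hbefore⟩, -⟩
    rcases Nat.lt_trichotomy rl 4 with hlt | heq | hgt
    · exfalso
      have hrm : rl ≠ m := by omega
      have hnd := hbd.resolve_left hrm
      have := all_dig_seg s i 4 (by omega) hwall (m - rl - 1) (by omega) (by omega)
      rw [this] at hnd
      exact absurd hnd (by simp)
    · exact heq
    · exfalso
      have hipos : (i : Int) ≠ 0 := by
        intro h0
        have : i = 0 := by exact_mod_cast h0
        omega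
      have hbef := hbefore.resolve_left hipos
      have hc : ((i : Int) - 1) = (((i - 1 : Nat)) : Int) := by omega
      rw [hc, PySem.List.pyGetD_natCast] at hbef
      have := all_dig_seg s (m - rl) rl (by omega) hall (i - 1) (by omega) (by omega)
      rw [this] at hbef
      simp at hbef
  · intro hrl4
    subst hrl4
    have hrun : m - 4 = i := by omega
    rw [hrun] at hall hbd
    refine ⟨⟨⟨?_, hall⟩, ?_⟩, ?_⟩
    · rw [List.isEmpty_eq_false_iff, ← List.length_pos_iff, hwlen]; omega
    · by_cases hi0 : i = 0
      · left; simp [hi0]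
      · right
        have hrm : (4 : Nat) ≠ m := by omega
        have hnd := hbd.resolve_left hrm
        have hc : ((i : Int) - 1) = (((i - 1 : Nat)) : Int) := by omega
        rw [hc, PySem.List.pyGetD_natCast]
        have : m - 4 - 1 = i - 1 := by omega
        rw [this] at hnd
        exact hnd
    · simpa [Bool.or_eq_true, decide_eq_true_eq, Bool.not_eq_eq_eq_not] using hafter

theorem getD_m (s : List Char) (m : Nat) (hms : m < s.length) :
    PySem.List.pyGetD s ((m : Nat) : Int) ' ' = s[m] := by
  rw [PySem.List.pyGetD_natCast, List.getD_eq_getElem s ' ' hms]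

theorem cast4 (m : Nat) (h4 : 4 ≤ m) : ((m - 4 : Nat) : Int) + 4 = ((m : Nat) : Int) := by omega

-- the scan invariant over prefixes: the run is the maximal digit suffix of the prefix
-- and the candidate is A's last accepted window among those ending inside the prefix
theorem scan_invariant (s : List Char) (m : Nat) (hm : m ≤ s.length) :
    ∃ rl : Nat, rl ≤ m ∧
      tsAltScan (s.take m) [] none = ((s.drop (m - rl)).take rl, optOf (lastY s (m - 4))) ∧
      ((s.drop (m - rl)).take rl).all PySem.Chars.isdigit = true ∧
      (rl = m ∨ PySem.Chars.isdigit (s.getD (m - rl - 1) ' ') = false) := by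
  induction m with
  | zero => exact ⟨0, le_refl 0, by simp [tsAltScan, optOf, lastY], by simp, Or.inl rfl⟩
  | succ m ih =>
    obtain ⟨rl, hrl, hscan, hall, hbd⟩ := ih (by omega)
    have hms : m < s.length := by omega
    have hrunlen : ((s.drop (m - rl)).take rl).length = rl := by
      simp [List.length_take, List.length_drop]; omega
    have htake : s.take (m + 1) = s.take m ++ [s[m]] := by
      rw [List.take_succ]; simp [List.getElem?_eq_getElem hms]
    have hsn := scan_snoc (s.take m) s[m] [] none
    rw [hscan] at hsn
    by_cases hd : PySem.Chars.isdigit s[m] = true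
    · -- digit: run extends, year unchanged
      refine ⟨rl + 1, by omega, ?_, ?_, ?_⟩
      · rw [htake, hsn]
        simp only [hd, if_true]
        have h1 : m + 1 - (rl + 1) = m - rl := by omega
        have h2 : (s.drop (m - rl)).take (rl + 1) = (s.drop (m - rl)).take rl ++ [s[m]] := by
          rw [List.take_succ]
          have : (s.drop (m - rl))[rl]? = some s[m] := by
            rw [List.getElem?_drop]
            have : m - rl + rl = m := by omega
            rw [this, List.getElem?_eq_getElem hms]
          simp [this]
        have h3 : optOf (lastY s (m - 4)) = optOf (lastY s (m + 1 - 4)) := by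
          by_cases h : m ≤ 3
          · have : m + 1 - 4 = m - 4 := by omega
            rw [this]
          · have h14 : m + 1 - 4 = (m - 4) + 1 := by omega
            have hcond : tsCondA s (((m - 4 : Nat)) : Int) = false := by
              unfold tsCondA
              have : (decide ((s.length : Int) ≤ ((m - 4 : Nat) : Int) + 4)
                  || ! PySem.Chars.isdigit (PySem.List.pyGetD s (((m - 4 : Nat) : Int) + 4) ' ')) = false := by
                rw [cast4 m (by omega), getD_m s m hms]
                simp [hd]
                omega
              rw [this, Bool.and_false]
            rw [h14]
            simp [lastY, hcond]
        rw [h1, h2, h3]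
      · have h1 : m + 1 - (rl + 1) = m - rl := by omega
        rw [h1, List.take_succ]
        have : (s.drop (m - rl))[rl]? = some s[m] := by
          rw [List.getElem?_drop]
          have : m - rl + rl = m := by omega
          rw [this, List.getElem?_eq_getElem hms]
        simp [this, hall, hd]
      · rcases hbd with h | h
        · left; omega
        · by_cases hrm : rl + 1 = m + 1
          · exact Or.inl hrm
          · right
            have : m + 1 - (rl + 1) - 1 = m - rl - 1 := by omega
            rw [this]; exact h
    · -- non-digit: run resets, a run of length exactly 4 is recorded
      have hd' : PySem.Chars.isdigit s[m] = false := by simpa using hd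
      refine ⟨0, by omega, ?_, by simp, ?_⟩
      · rw [htake, hsn]
        simp only [hd', if_false, Bool.false_eq_true]
        have hz : (s.drop (m + 1 - 0)).take 0 = [] := by simp
        rw [hz]
        have hy : (if ((s.drop (m - rl)).take rl).length == 4
              then some ((s.drop (m - rl)).take rl) else optOf (lastY s (m - 4)))
            = optOf (lastY s (m + 1 - 4)) := by
          by_cases h : m ≤ 3
          · have hne : ¬ (((s.drop (m - rl)).take rl).length == 4) = true := by
              rw [hrunlen]; simp; omega
            simp only [hne, Bool.false_eq_true, if_false]
            have : m + 1 - 4 = m - 4 := by omega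
            rw [this]
          · have hafter : (decide ((s.length : Int) ≤ ((m - 4 : Nat) : Int) + 4)
                || ! PySem.Chars.isdigit (PySem.List.pyGetD s (((m - 4 : Nat) : Int) + 4) ' ')) = true := by
              rw [cast4 m (by omega), getD_m s m hms, hd']
              simp
            have hiff := cond_iff s m rl (by omega) (by omega) hrl hall hbd hafter
            have h14 : m + 1 - 4 = (m - 4) + 1 := by omega
            rw [h14]
            by_cases hrl4 : rl = 4
            · have hcond : tsCondA s (((m - 4 : Nat)) : Int) = true := hiff.mpr hrl4
              simp only [lastY, hcond, if_true]
              have hslice : PySem.List.slice s (some ((m - 4 : Nat) : Int)) (some (((m - 4 : Nat) : Int) + 4))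
                  = (s.drop (m - 4)).take 4 := by
                have h4' : (((m - 4 : Nat) : Int) + 4) = (((m - 4 : Nat) : Int) + ((4 : Nat) : Int)) := by norm_cast
                rw [h4', PySem.List.slice_natCast_add]
              rw [hslice]
              have hmr : m - rl = m - 4 := by omega
              rw [hmr] at hrunlen ⊢
              have htrue : (((s.drop (m - 4)).take rl).length == 4) = true := by
                rw [hrunlen]; simp [hrl4]
              rw [hrl4] at htrue ⊢
              simp only [htrue, if_true]
              have hne : (s.drop (m - 4)).take 4 ≠ [] := by
                rw [hrl4] at hrunlen
                intro hnil; rw [hnil] at hrunlen; simp at hrunlen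
              simp [optOf, hne]
            · have hcond : tsCondA s (((m - 4 : Nat)) : Int) = false := by
                rcases Bool.eq_false_or_eq_true (tsCondA s (((m - 4 : Nat)) : Int)) with h | h
                · exact absurd (hiff.mp h) hrl4
                · exact h
              have hne : ¬ (((s.drop (m - rl)).take rl).length == 4) = true := by
                rw [hrunlen]; simp; omega
              simp only [hne, Bool.false_eq_true, if_false, lastY, hcond]
        rw [hy]
      · right
        have : m + 1 - 0 - 1 = m := by omega
        rw [this, List.getD_eq_getElem s ' ' hms]
        exact hd'

-- the two word computations agree
theorem word_eq (s : List Char) :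
    PySem.List.slice s none (some (tsAltEnd (PySem.List.enumerate s 0) (s.length : Int))) = tsWordA s := by
  have h0 : ((s.length : Int)) = 0 + (s.length : Int) := by ring
  rw [h0, altEnd_eq s 0]
  have : (0 : Int) + ((s.takeWhile fun c => ! tsStopA c).length : Int)
      = (((s.takeWhile fun c => ! tsStopA c).length : Nat) : Int) := by ring
  rw [this, PySem.List.slice_to_natCast]
  rw [wordA_eq_takeWhile]
  exact (List.prefix_iff_eq_take.mp (List.takeWhile_prefix _)).symm

-- the two year computations agree
theorem year_eq (s : List Char) :
    (if (tsAltScan s [] none).1.length == 4 then some (tsAltScan s [] none).1 else (tsAltScan s [] none).2)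
      = optOf (lastY s (s.length - 3)) := by
  obtain ⟨rl, hrl, hscan, hall, hbd⟩ := scan_invariant s s.length (le_refl _)
  rw [List.take_length] at hscan
  rw [hscan]
  have hrunlen : ((s.drop (s.length - rl)).take rl).length = rl := by
    simp [List.length_take, List.length_drop]; omega
  by_cases h : s.length ≤ 3
  · have hne : ¬ (((s.drop (s.length - rl)).take rl).length == 4) = true := by
      rw [hrunlen]; simp; omega
    simp only [hne, Bool.false_eq_true, if_false]
    have : s.length - 3 = s.length - 4 := by omega
    rw [this]
  · have h4 : 4 ≤ s.length := by omega
    have hafter : (decide ((s.length : Int) ≤ ((s.length - 4 : Nat) : Int) + 4)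
        || ! PySem.Chars.isdigit (PySem.List.pyGetD s (((s.length - 4 : Nat) : Int) + 4) ' ')) = true := by
      have : ((s.length - 4 : Nat) : Int) + 4 = (s.length : Int) := by omega
      rw [this]; simp
    have hiff := cond_iff s s.length rl h4 (le_refl _) hrl hall hbd hafter
    have h14 : s.length - 3 = (s.length - 4) + 1 := by omega
    rw [h14]
    by_cases hrl4 : rl = 4
    · have hcond : tsCondA s (((s.length - 4 : Nat)) : Int) = true := hiff.mpr hrl4
      simp only [lastY, hcond, if_true]
      have hslice : PySem.List.slice s (some ((s.length - 4 : Nat) : Int)) (some (((s.length - 4 : Nat) : Int) + 4))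
          = (s.drop (s.length - 4)).take 4 := by
        have h4' : (((s.length - 4 : Nat) : Int) + 4) = (((s.length - 4 : Nat) : Int) + ((4 : Nat) : Int)) := by norm_cast
        rw [h4', PySem.List.slice_natCast_add]
      rw [hslice]
      have hmr : s.length - rl = s.length - 4 := by omega
      rw [hmr] at hrunlen ⊢
      have htrue : (((s.drop (s.length - 4)).take rl).length == 4) = true := by
        rw [hrunlen]; simp [hrl4]
      rw [hrl4] at htrue ⊢
      simp only [htrue, if_true]
      have hne : (s.drop (s.length - 4)).take 4 ≠ [] := by
        rw [hrl4] at hrunlen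
        intro hnil; rw [hnil] at hrunlen; simp at hrunlen
      simp [optOf, hne]
    · have hcond : tsCondA s (((s.length - 4 : Nat)) : Int) = false := by
        rcases Bool.eq_false_or_eq_true (tsCondA s (((s.length - 4 : Nat)) : Int)) with h | h
        · exact absurd (hiff.mp h) hrl4
        · exact h
      have hne : ¬ (((s.drop (s.length - rl)).take rl).length == 4) = true := by
        rw [hrunlen]; simp; omega
      simp only [hne, Bool.false_eq_true, if_false, lastY, hcond]

-- ===== VERDICT (by name: the statement is the Claim_ definition above) =====
theorem truncate_source_spec : Claim_equal_truncate_source := by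
  intro source _
  unfold Spec_truncate_source truncate_source truncate_source_alt
  simp only []
  set s := source.toList with hs
  rw [word_eq s, year_eq s]
  by_cases h4 : 4 ≤ s.length
  · simp only [h4, if_true]
    have hc : ((s.length : Int) - 3) = (((s.length - 3 : Nat)) : Int) := by omega
    rw [hc, foldA_eq_lastY s (s.length - 3)]
    by_cases hnil : lastY s (s.length - 3) = []
    · simp [hnil, optOf]
    · simp [hnil, optOf]
  · simp only [h4, if_false]
    have h3 : s.length - 3 = 0 := by omega
    rw [h3]
    simp [lastY, optOf]
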